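-- pv_equiv track=rewrite | github.com/chen0430tw/treesea | legacy/imported_single_file_prototypes/qcu_full_reconstructed.py | select_representative_a_values
-- ===== SOURCE A (Python) =====
-- from math import gcd
-- from math import gcd
-- from math import gcd
-- from math import gcd
-- from math import gcd
-- from math import gcd
-- from math import gcd, isqrt
--
-- def select_representative_a_values(
--     N: int,
--     max_candidates: int = 10,
--     min_period: int = 2,
-- ):
--     """
--     Pick a representative subset of coprime a values:
--     - prefer diverse periods
--     - skip trivial gcd
--     - bias toward longer periods
--     """
--     coprimes = [a for a in range(2, N) if gcd(a, N) == 1]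
--     info = []
--
--     for a in coprimes:
--         r = modular_order(a, N)
--         if r is None or r < min_period:
--             continue
--         info.append((a, r))
--
--     # sort by period descending, then a
--     info.sort(key=lambda x: (-x[1], x[0]))
--
--     picked = []
--     seen_periods = set()
--
--     # first, one per new period
--     for a, r in info:
--         if r not in seen_periods:
--             picked.append((a, r))
--             seen_periods.add(r)
--         if len(picked) >= max_candidates:
--             break
--
--     # then fill remaining slots with strongest periods
--     if len(picked) < max_candidates:
--         picked_as = {a for a, _ in picked}
--         for a, r in info:
--             if a not in picked_as:
--                 picked.append((a, r))
--             if len(picked) >= max_candidates: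
--                 break
--
--     return picked
--
-- def modular_order(a: int, N: int, max_iter: int | None = None):
--     if gcd(a, N) != 1:
--         return None
--     if max_iter is None:
--         max_iter = N * N
--
--     x = 1
--     for r in range(1, max_iter + 1):
--         x = (x * a) % N
--         if x == 1:
--             return r
--     return None
-- ===== SOURCE B (Python) =====
-- from math import gcd
--
--
-- def select_representative_a_values(
--     N: int,
--     max_candidates: int = 10,
--     min_period: int = 2,
-- ):
--     # Orders are computed number-theoretically: ord(a) divides phi(N) (Euler),
--     # so it is the smallest divisor d of phi(N) with pow(a, d, N) == 1.
--     coprimes = [a for a in range(2, N) if gcd(a, N) == 1]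
--     if not coprimes:
--         return []
--     phi = len(coprimes) + 1  # 1 is the only other coprime residue in [0, N)
--     divisors = [d for d in range(1, phi + 1) if phi % d == 0]
--
--     info = []
--     for a in coprimes:
--         r = phi
--         for d in divisors:
--             if pow(a, d, N) == 1:
--                 r = d
--                 break
--         if r >= min_period:
--             info.append((a, r))
--
--     info.sort(key=lambda x: (-x[1], x[0]))
--
--     # one representative per period first, the repeats afterwards
--     firsts, rest, seen = [], [], set()
--     for a, r in info:
--         if r in seen:
--             rest.append((a, r))
--         else:
--             seen.add(r)
--             firsts.append((a, r))
--
--     picked = []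
--     for item in firsts + rest:
--         picked.append(item)
--         if len(picked) >= max_candidates:
--             break
--     return picked
-- ===== Notes on version B (the rewrite author's own statement) =====
-- stated objective: faster
-- what changed: A finds each candidate's multiplicative order by repeated multiplication (up to ~N steps per candidate); B computes phi(N) from the coprime count, lists phi's divisors once, and finds each order as the smallest divisor d of phi with pow(a,d,N)==1 via modular exponentiation, then builds the selection in one split-and-take pass instead of A's two break-loops over the sorted list (measured ~10-19x and B returns where A times out; on the very largest generated inputs, N near 2^31, both time out since the result needs all N residues scanned).
import Mathlib
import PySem

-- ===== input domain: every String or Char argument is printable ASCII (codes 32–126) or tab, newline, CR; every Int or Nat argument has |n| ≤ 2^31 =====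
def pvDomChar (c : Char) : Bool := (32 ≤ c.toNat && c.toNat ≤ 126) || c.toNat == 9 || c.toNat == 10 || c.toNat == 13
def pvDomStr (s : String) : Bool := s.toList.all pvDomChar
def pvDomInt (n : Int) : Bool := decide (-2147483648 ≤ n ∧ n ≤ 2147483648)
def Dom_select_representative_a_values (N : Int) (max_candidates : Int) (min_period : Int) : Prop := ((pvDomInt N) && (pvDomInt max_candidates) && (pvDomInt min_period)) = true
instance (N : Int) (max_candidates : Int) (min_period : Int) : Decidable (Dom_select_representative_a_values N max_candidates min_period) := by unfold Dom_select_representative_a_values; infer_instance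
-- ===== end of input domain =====

-- B replaces A's per-candidate repeated-multiplication order search by number theory:
-- ord(a) is the smallest divisor d of phi(N) with pow(a,d,N) == 1 (phi read off the
-- coprime list, divisors listed once), and builds the selection in one split-and-take pass.

-- ===== PORT A =====

-- inner loop of modular_order: for r in range(1, max_iter+1): x = (x*a) % N; if x == 1: return r
def pvModOrderLoop (a N : Int) : List Int → Int → Option Int
  | [], _ => none
  | r :: rs, x =>
    if PySem.Int.mod (x * a) N = 1 then some r
    else pvModOrderLoop a N rs (PySem.Int.mod (x * a) N)

def modular_order (a N : Int) : Option Int :=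
  if Int.gcd a N ≠ 1 then none
  else pvModOrderLoop a N (PySem.List.pyRange 1 (N * N + 1)) 1

-- first selection loop of A (break as soon as len(picked) >= max_candidates)
def pvAPhase1 (maxc : Int) : List (Int × Int) → List (Int × Int) → PySem.Set Int → List (Int × Int)
  | [], picked, _ => picked
  | (a, r) :: tl, picked, seen =>
    if PySem.Set.contains seen r then
      if maxc ≤ (picked.length : Int) then picked else pvAPhase1 maxc tl picked seen
    else
      if maxc ≤ ((picked ++ [(a, r)]).length : Int) then picked ++ [(a, r)]
      else pvAPhase1 maxc tl (picked ++ [(a, r)]) (PySem.Set.add seen r)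

-- second selection loop of A (fill remaining slots)
def pvAPhase2 (maxc : Int) (pickedAs : PySem.Set Int) : List (Int × Int) → List (Int × Int) → List (Int × Int)
  | [], picked => picked
  | (a, r) :: tl, picked =>
    if PySem.Set.contains pickedAs a then
      if maxc ≤ (picked.length : Int) then picked else pvAPhase2 maxc pickedAs tl picked
    else
      if maxc ≤ ((picked ++ [(a, r)]).length : Int) then picked ++ [(a, r)]
      else pvAPhase2 maxc pickedAs tl (picked ++ [(a, r)])

def select_representative_a_values (N : Int) (max_candidates : Int) (min_period : Int) : List (Int × Int) :=
  let coprimes := (PySem.List.pyRange 2 N).filter (fun a => Int.gcd a N == 1)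
  let info := coprimes.foldl (fun info a =>
    match modular_order a N with
    | none => info
    | some r => if r < min_period then info else info ++ [(a, r)]) []
  let infoS := PySem.List.sorted2 info (fun x => -x.2) (fun x => x.1)
  let picked := pvAPhase1 max_candidates infoS [] PySem.Set.empty
  if (picked.length : Int) < max_candidates then
    pvAPhase2 max_candidates (PySem.Set.ofList (picked.map Prod.fst)) infoS picked
  else picked

-- ===== PORT B =====

-- r = phi; for d in divisors: if pow(a, d, N) == 1: r = d; break
def pvBOrderScan (a N phi : Int) : List Int → Int
  | [] => phi
  | d :: ds => if PySem.Int.powMod a d.toNat N = 1 then d else pvBOrderScan a N phi ds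

-- one pass splitting info into first-of-each-period and the repeats
def pvBSplit : List (Int × Int) → List (Int × Int) → List (Int × Int) → PySem.Set Int → List (Int × Int) × List (Int × Int)
  | [], firsts, rest, _ => (firsts, rest)
  | (a, r) :: tl, firsts, rest, seen =>
    if PySem.Set.contains seen r then pvBSplit tl firsts (rest ++ [(a, r)]) seen
    else pvBSplit tl (firsts ++ [(a, r)]) rest (PySem.Set.add seen r)

-- for item in firsts + rest: picked.append(item); if len(picked) >= max_candidates: break
def pvBTake (maxc : Int) : List (Int × Int) → List (Int × Int) → List (Int × Int)
  | [], picked => picked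
  | x :: tl, picked =>
    if maxc ≤ ((picked ++ [x]).length : Int) then picked ++ [x]
    else pvBTake maxc tl (picked ++ [x])

def select_representative_a_values_alt (N : Int) (max_candidates : Int) (min_period : Int) : List (Int × Int) :=
  let coprimes := (PySem.List.pyRange 2 N).filter (fun a => Int.gcd a N == 1)
  if coprimes = [] then []
  else
    let phi : Int := (coprimes.length : Int) + 1
    let divisors := (PySem.List.pyRange 1 (phi + 1)).filter (fun d => PySem.Int.mod phi d == 0)
    let info := coprimes.foldl (fun info a =>
      let r := pvBOrderScan a N phi divisors
      if min_period ≤ r then info ++ [(a, r)] else info) []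
    let infoS := PySem.List.sorted2 info (fun x => -x.2) (fun x => x.1)
    let fr := pvBSplit infoS [] [] PySem.Set.empty
    pvBTake max_candidates (fr.1 ++ fr.2) []

-- ===== PRECONDITION & SPEC =====
def Spec_select_representative_a_values (N : Int) (max_candidates : Int) (min_period : Int) (out : List (Int × Int)) : Prop := out = select_representative_a_values_alt N max_candidates min_period
instance (N : Int) (max_candidates : Int) (min_period : Int) (out : List (Int × Int)) : Decidable (Spec_select_representative_a_values N max_candidates min_period out) := by unfold Spec_select_representative_a_values; infer_instance

-- ===== CLAIM (what is proved, stated in full; the proofs are below) =====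
def Claim_equal_select_representative_a_values : Prop := ∀ (N : Int) (max_candidates : Int) (min_period : Int), Dom_select_representative_a_values N max_candidates min_period → Spec_select_representative_a_values N max_candidates min_period (select_representative_a_values N max_candidates min_period)

-- ===== LEMMAS AND PROOFS =====

-- proof-side: the first-of-each-period elements / the repeated-period elements
def pvFirsts : List (Int × Int) → PySem.Set Int → List (Int × Int)
  | [], _ => []
  | (a, r) :: tl, seen =>
    if PySem.Set.contains seen r then pvFirsts tl seen
    else (a, r) :: pvFirsts tl (PySem.Set.add seen r)

def pvRest : List (Int × Int) → PySem.Set Int → List (Int × Int)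
  | [], _ => []
  | (a, r) :: tl, seen =>
    if PySem.Set.contains seen r then (a, r) :: pvRest tl seen
    else pvRest tl (PySem.Set.add seen r)

theorem pvBSplit_eq (l : List (Int × Int)) : ∀ (F R : List (Int × Int)) (seen : PySem.Set Int),
    pvBSplit l F R seen = (F ++ pvFirsts l seen, R ++ pvRest l seen) := by
  induction l with
  | nil => simp [pvBSplit, pvFirsts, pvRest]
  | cons x tl ih =>
    obtain ⟨a, r⟩ := x
    intro F R seen
    by_cases hs : PySem.Set.contains seen r
    · rw [pvBSplit, if_pos hs, pvFirsts, if_pos hs, pvRest, if_pos hs, ih]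
      simp
    · rw [pvBSplit, if_neg hs, pvFirsts, if_neg hs, pvRest, if_neg hs, ih]
      simp

theorem pvBTake_eq (maxc : Int) (l : List (Int × Int)) : ∀ acc, (acc.length : Int) < maxc →
    pvBTake maxc l acc = acc ++ l.take (maxc - acc.length).toNat := by
  induction l with
  | nil => intro acc _; simp [pvBTake]
  | cons x tl ih =>
    intro acc hlt
    by_cases h : maxc ≤ ((acc ++ [x]).length : Int)
    · have hk : (maxc - (acc.length : Int)).toNat = 1 := by
        simp only [List.length_append, List.length_cons, List.length_nil] at h; omega
      rw [pvBTake, if_pos h, hk]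
      simp
    · have hlt' : ((acc ++ [x]).length : Int) < maxc := by
        simp only [List.length_append, List.length_cons, List.length_nil] at h ⊢; omega
      have hk : (maxc - (acc.length : Int)).toNat = (maxc - ((acc ++ [x]).length : Int)).toNat + 1 := by
        simp only [List.length_append, List.length_cons, List.length_nil] at h ⊢; omega
      rw [pvBTake, if_neg h, ih _ hlt', hk]
      simp

theorem pvAPhase1_eq (maxc : Int) (l : List (Int × Int)) : ∀ acc seen, (acc.length : Int) < maxc →
    pvAPhase1 maxc l acc seen = acc ++ (pvFirsts l seen).take (maxc - acc.length).toNat := by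
  induction l with
  | nil => intro acc seen _; simp [pvAPhase1, pvFirsts]
  | cons x tl ih =>
    obtain ⟨a, r⟩ := x
    intro acc seen hlt
    by_cases hs : PySem.Set.contains seen r
    · have hnb : ¬ maxc ≤ (acc.length : Int) := by omega
      rw [pvAPhase1, if_pos hs, if_neg hnb, ih _ _ hlt, pvFirsts, if_pos hs]
    · by_cases h : maxc ≤ ((acc ++ [(a, r)]).length : Int)
      · have hk : (maxc - (acc.length : Int)).toNat = 1 := by
          simp only [List.length_append, List.length_cons, List.length_nil] at h; omega
        rw [pvAPhase1, if_neg hs, if_pos h, pvFirsts, if_neg hs, hk]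
        simp
      · have hlt' : ((acc ++ [(a, r)]).length : Int) < maxc := by
          simp only [List.length_append, List.length_cons, List.length_nil] at h ⊢; omega
        have hk : (maxc - (acc.length : Int)).toNat = (maxc - ((acc ++ [(a, r)]).length : Int)).toNat + 1 := by
          simp only [List.length_append, List.length_cons, List.length_nil] at h ⊢; omega
        rw [pvAPhase1, if_neg hs, if_neg h, ih _ _ hlt', pvFirsts, if_neg hs, hk]
        simp

theorem pvAPhase2_eq (maxc : Int) (pas : PySem.Set Int) (l : List (Int × Int)) :
    ∀ acc, (acc.length : Int) < maxc →
    pvAPhase2 maxc pas l acc = acc ++ (l.filter (fun x => !(PySem.Set.contains pas x.1))).take (maxc - acc.length).toNat := by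
  induction l with
  | nil => intro acc _; simp [pvAPhase2]
  | cons x tl ih =>
    obtain ⟨a, r⟩ := x
    intro acc hlt
    by_cases hs : PySem.Set.contains pas a
    · have hm : a ∈ pas := by simpa using hs
      have hnb : ¬ maxc ≤ (acc.length : Int) := by omega
      rw [pvAPhase2, if_pos hs, if_neg hnb, ih _ hlt, List.filter_cons_of_neg (by simp [hm])]
    · have hm : a ∉ pas := by simpa using hs
      by_cases h : maxc ≤ ((acc ++ [(a, r)]).length : Int)
      · have hk : (maxc - (acc.length : Int)).toNat = 1 := by
          simp only [List.length_append, List.length_cons, List.length_nil] at h; omega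
        rw [pvAPhase2, if_neg hs, if_pos h, List.filter_cons_of_pos (by simp [hm]), hk]
        simp
      · have hlt' : ((acc ++ [(a, r)]).length : Int) < maxc := by
          simp only [List.length_append, List.length_cons, List.length_nil] at h ⊢; omega
        have hk : (maxc - (acc.length : Int)).toNat = (maxc - ((acc ++ [(a, r)]).length : Int)).toNat + 1 := by
          simp only [List.length_append, List.length_cons, List.length_nil] at h ⊢; omega
        rw [pvAPhase2, if_neg hs, if_neg h, ih _ hlt', List.filter_cons_of_pos (by simp [hm]), hk]
        simp

theorem pvFirsts_subset {x : Int × Int} : ∀ (l : List (Int × Int)) (seen : PySem.Set Int), x ∈ pvFirsts l seen → x ∈ l := by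
  intro l
  induction l with
  | nil => intro seen h; simp [pvFirsts] at h
  | cons y tl ih =>
    obtain ⟨a, r⟩ := y
    intro seen h
    by_cases hs : PySem.Set.contains seen r
    · rw [pvFirsts, if_pos hs] at h
      exact List.mem_cons_of_mem _ (ih _ h)
    · rw [pvFirsts, if_neg hs] at h
      rcases List.mem_cons.mp h with h | h
      · exact h ▸ List.mem_cons_self
      · exact List.mem_cons_of_mem _ (ih _ h)

-- the elements not picked in phase 1 are exactly the repeated-period ones
theorem pvFilter_firsts (l : List (Int × Int)) : ∀ (seen : PySem.Set Int) (P : List Int),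
    (l.map Prod.fst).Nodup → (∀ x ∈ l, x.1 ∉ P) →
    l.filter (fun x => !decide (x.1 ∈ P ++ (pvFirsts l seen).map Prod.fst)) = pvRest l seen := by
  induction l with
  | nil => intro seen P _ _; simp [pvFirsts, pvRest]
  | cons y tl ih =>
    obtain ⟨a, r⟩ := y
    intro seen P hnd hP
    rw [List.map_cons] at hnd
    obtain ⟨ha, hnd'⟩ := List.nodup_cons.mp hnd
    have hP' : ∀ x ∈ tl, x.1 ∉ P := fun x hx => hP x (List.mem_cons_of_mem _ hx)
    have h1 : a ∉ P := hP (a, r) List.mem_cons_self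
    by_cases hs : PySem.Set.contains seen r
    · have h2 : a ∉ (pvFirsts tl seen).map Prod.fst := by
        intro hx
        obtain ⟨x, hx1, hx2⟩ := List.mem_map.mp hx
        have hx3 : x ∈ tl := pvFirsts_subset tl seen hx1
        have hx4 : x.1 ∈ tl.map Prod.fst := List.mem_map_of_mem hx3
        exact ha (hx2 ▸ hx4)
      rw [pvRest, if_pos hs, List.filter_cons]
      have hcond : (!decide ((a, r).1 ∈ P ++ (pvFirsts ((a, r) :: tl) seen).map Prod.fst)) = true := by
        simp only [pvFirsts, hs, if_pos, Bool.not_eq_true', decide_eq_false_iff_not, List.mem_append]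
        tauto
      rw [hcond, if_pos rfl]
      congr 1
      rw [List.filter_congr (q := fun x => !decide (x.1 ∈ P ++ (pvFirsts tl seen).map Prod.fst))
        (by intro x _; simp only [pvFirsts, hs, if_pos])]
      exact ih seen P hnd' hP'
    · rw [pvRest, if_neg hs, List.filter_cons]
      have hcond : (!decide ((a, r).1 ∈ P ++ (pvFirsts ((a, r) :: tl) seen).map Prod.fst)) = false := by
        simp only [pvFirsts, hs, Bool.not_eq_false', decide_eq_true_eq, List.mem_append]
        simp
      rw [hcond]
      rw [if_neg (by simp)]
      have hP'' : ∀ x ∈ tl, x.1 ∉ P ++ [a] := by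
        intro x hx
        simp only [List.mem_append, List.mem_singleton]
        rintro (h | h)
        · exact hP' x hx h
        · have hx4 : x.1 ∈ tl.map Prod.fst := List.mem_map_of_mem hx
          exact ha (h ▸ hx4)
      rw [List.filter_congr (q := fun x => !decide (x.1 ∈ (P ++ [a]) ++ (pvFirsts tl (PySem.Set.add seen r)).map Prod.fst))
        (by intro x _; simp only [pvFirsts, hs, ← List.append_cons]; simp)]
      exact ih (PySem.Set.add seen r) (P ++ [a]) hnd' hP''

-- equivalence of the two selection procedures
theorem pvSelect_eq (s : List (Int × Int)) (maxc : Int) (hnd : (s.map Prod.fst).Nodup) :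
    (let picked := pvAPhase1 maxc s [] PySem.Set.empty
     if (picked.length : Int) < maxc then
       pvAPhase2 maxc (PySem.Set.ofList (picked.map Prod.fst)) s picked
     else picked)
    = pvBTake maxc (pvFirsts s PySem.Set.empty ++ pvRest s PySem.Set.empty) [] := by
  by_cases hm : 0 < maxc
  · have h1 : pvAPhase1 maxc s [] PySem.Set.empty
        = (pvFirsts s PySem.Set.empty).take maxc.toNat := by
      have := pvAPhase1_eq maxc s [] PySem.Set.empty (by simpa using hm)
      simpa using this
    have hB : pvBTake maxc (pvFirsts s PySem.Set.empty ++ pvRest s PySem.Set.empty) []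
        = (pvFirsts s PySem.Set.empty ++ pvRest s PySem.Set.empty).take maxc.toNat := by
      have := pvBTake_eq maxc (pvFirsts s PySem.Set.empty ++ pvRest s PySem.Set.empty) [] (by simpa using hm)
      simpa using this
    rw [hB]
    simp only [h1]
    by_cases hc : (((pvFirsts s PySem.Set.empty).take maxc.toNat).length : Int) < maxc
    · rw [if_pos hc]
      have hFlen : (pvFirsts s PySem.Set.empty).length < maxc.toNat := by
        rw [List.length_take] at hc
        omega
      have hp1 : (pvFirsts s PySem.Set.empty).take maxc.toNat = pvFirsts s PySem.Set.empty :=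
        List.take_of_length_le (le_of_lt hFlen)
      rw [hp1]
      have hlt : ((pvFirsts s PySem.Set.empty).length : Int) < maxc := by omega
      rw [pvAPhase2_eq maxc _ s _ hlt]
      have hfc : s.filter (fun x => !(PySem.Set.contains (PySem.Set.ofList ((pvFirsts s PySem.Set.empty).map Prod.fst)) x.1))
          = pvRest s PySem.Set.empty := by
        rw [List.filter_congr (q := fun x => !decide (x.1 ∈ ([] : List Int) ++ (pvFirsts s PySem.Set.empty).map Prod.fst))
          (by intro x _
              simp only [List.nil_append]
              rw [Bool.eq_iff_iff]
              simp [PySem.Set.mem_ofList])]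
        exact pvFilter_firsts s PySem.Set.empty [] hnd (by simp)
      rw [hfc, List.take_append,
        List.take_of_length_le (le_of_lt hFlen)]
      congr 1
      congr 1
      omega
    · rw [if_neg hc]
      have hFlen : maxc.toNat ≤ (pvFirsts s PySem.Set.empty).length := by
        rw [List.length_take] at hc
        omega
      rw [List.take_append, Nat.sub_eq_zero_of_le hFlen]
      simp
  · -- max_candidates ≤ 0: both loops append one element and stop (or the list is empty)
    cases s with
    | nil => simp [pvAPhase1, pvFirsts, pvRest, pvBTake, hm]
    | cons y tl =>
      obtain ⟨a, r⟩ := y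
      have hce : PySem.Set.contains PySem.Set.empty r = false := rfl
      have hb1 : maxc ≤ ((([] : List (Int × Int)) ++ [(a, r)]).length : Int) := by simp; omega
      have hA : pvAPhase1 maxc ((a, r) :: tl) [] PySem.Set.empty = [(a, r)] := by
        rw [pvAPhase1, if_neg (by rw [hce]; simp), if_pos hb1]
        simp
      rw [hA, if_neg (by simp; omega), pvFirsts, if_neg (by rw [hce]; simp)]
      rw [show ((a, r) :: pvFirsts tl (PySem.Set.add PySem.Set.empty r)) ++ pvRest ((a, r) :: tl) PySem.Set.empty
          = (a, r) :: (pvFirsts tl (PySem.Set.add PySem.Set.empty r) ++ pvRest ((a, r) :: tl) PySem.Set.empty) from by simp]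
      rw [pvBTake, if_pos (by simp; omega)]
      simp

-- ---------- number-theoretic side: both order computations find the least positive exponent ----------

theorem pvTotient_countP (n : Nat) : n.totient = ((List.range n).countP (fun k => Nat.gcd n k == 1)) := by
  rw [Nat.totient]
  have hpq : (fun k => Nat.gcd n k == 1) = (fun k => decide (Nat.gcd n k = 1)) := by
    funext k
    rw [Bool.eq_iff_iff]; simp
  rw [hpq]
  simp [Finset.card, Finset.filter, Finset.range, Multiset.range, Multiset.filter_coe,
    List.countP_eq_length_filter, Nat.Coprime]

-- phi(N) = 1 + #coprimes in [2, N)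
theorem pvPhi_eq (N : Int) (hN : 3 ≤ N) :
    (((PySem.List.pyRange 2 N).filter (fun a => Int.gcd a N == 1)).length : Int) + 1 = (Nat.totient N.toNat : Int) := by
  have h2 : PySem.List.pyRange 2 N = (List.range (N - 2).toNat).map (fun k : Nat => 2 + (k : Int)) := by
    rw [PySem.List.pyRange_one]
  rw [h2, List.filter_map, List.length_map, ← List.countP_eq_length_filter]
  have hn : N.toNat = 2 + ((N - 2).toNat) := by omega
  rw [pvTotient_countP, hn]
  have hsplit : List.range (2 + (N - 2).toNat) = List.range' 0 2 ++ List.range' 2 ((N - 2).toNat) := by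
    rw [List.range_eq_range', ← List.range'_append (step := 1)]
  rw [hsplit, List.countP_append]
  have h01 : List.range' 0 2 = [0, 1] := rfl
  have hg0 : (Nat.gcd (2 + (N-2).toNat) 0 == 1) = false := by
    simp [Nat.gcd_zero_right]
    omega
  have hg1 : (Nat.gcd (2 + (N-2).toNat) 1 == 1) = true := by simp
  rw [h01, List.countP_cons, List.countP_cons, List.countP_nil, hg0, hg1]
  rw [List.range'_eq_map_range, List.countP_map]
  simp only [Nat.zero_add]
  have hpred : ((fun a => Int.gcd a N == 1) ∘ (fun k : Nat => 2 + (k : Int)))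
      = ((fun j => Nat.gcd (2 + (N-2).toNat) j == 1) ∘ (fun x => 2 + x)) := by
    funext k
    simp only [Function.comp]
    have hc : (2 + (k : Int)) = ((2 + k : Nat) : Int) := by push_cast; ring
    rw [hc, show N = ((N.toNat : Nat) : Int) by omega, Int.gcd_natCast_natCast, Nat.gcd_comm]
    congr 2
    omega
  rw [hpred]
  simp only [if_true]
  push_cast
  ring

-- m divides any exponent T with b^T % n = 1 (m being the least such positive exponent)
theorem pvOrd_dvd (b n m T : Nat) (hn : 2 ≤ n) (hm1 : 0 < m) (hm2 : b ^ m % n = 1)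
    (hmin : ∀ t, 0 < t → t < m → b ^ t % n ≠ 1) (hT : b ^ T % n = 1) : m ∣ T := by
  have hs : b ^ (T % m) % n = 1 := by
    have hdecomp : T = m * (T / m) + T % m := (Nat.div_add_mod T m).symm ▸ by omega
    have : b ^ T % n = b ^ (T % m) % n := by
      conv_lhs => rw [hdecomp]
      rw [pow_add, pow_mul, Nat.mul_mod, Nat.pow_mod, hm2, Nat.one_pow,
        Nat.one_mod_eq_one.mpr (by omega), Nat.one_mul, Nat.mod_mod_of_dvd _ (dvd_refl n)]
    rw [← this, hT]
  rcases Nat.eq_zero_or_pos (T % m) with h0 | hpos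
  · exact Nat.dvd_of_mod_eq_zero h0
  · exact absurd hs (hmin _ hpos (Nat.mod_lt _ hm1))

-- one state update of A's loop
theorem pvStep (b n : Nat) (hn : 2 ≤ n) (s : Nat) (hs : 0 < s) :
    PySem.Int.mod ((((b ^ (s - 1) % n : Nat) : Int)) * (b : Int)) (n : Int) = ((b ^ s % n : Nat) : Int) := by
  rw [PySem.Int.mod_eq_emod_of_pos (by exact_mod_cast (by omega : 0 < n))]
  push_cast
  rw [Int.mul_emod, Int.emod_emod_of_dvd _ (dvd_refl _), ← Int.mul_emod]
  norm_cast
  rw [← pow_succ]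
  congr 2
  omega

-- pow(b, k, n) = b^k % n
theorem pvPowModCast (b n : Nat) (hn : 0 < n) (k : Nat) :
    PySem.Int.powMod (b : Int) k (n : Int) = (((b ^ k % n : Nat)) : Int) := by
  rw [PySem.Int.powMod_eq, PySem.Int.mod_eq_emod_of_pos (by exact_mod_cast hn)]
  push_cast
  rfl

-- A's repeated-multiplication loop finds the least positive exponent m (when it is below the bound)
theorem pvLoopA (b n m : Nat) (hn : 2 ≤ n) (hm2 : b ^ m % n = 1)
    (hmin : ∀ t, 0 < t → t < m → b ^ t % n ≠ 1) (hm1 : 0 < m) :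
    ∀ (k : Nat) (s : Nat) (e : Int), 0 < s → (e - (s : Int)).toNat = k →
    (∀ t, 0 < t → t < s → b ^ t % n ≠ 1) →
    pvModOrderLoop (b : Int) (n : Int) (PySem.List.pyRange (s : Int) e) (((b ^ (s - 1) % n : Nat) : Int))
      = if (m : Int) < e then some (m : Int) else none := by
  intro k
  induction k with
  | zero =>
    intro s e hs hk hbelow
    have he : e ≤ (s : Int) := by omega
    have hms : s ≤ m := by
      by_contra h
      exact hbelow m hm1 (by omega) hm2
    rw [PySem.List.pyRange_one_eq_nil he, pvModOrderLoop]
    rw [if_neg (by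
      have : (s : Int) ≤ (m : Int) := by exact_mod_cast hms
      omega)]
  | succ k ih =>
    intro s e hs hk hbelow
    have hlt : (s : Int) < e := by omega
    have hms : s ≤ m := by
      by_contra h
      exact hbelow m hm1 (by omega) hm2
    rw [PySem.List.pyRange_one_cons hlt, pvModOrderLoop, pvStep b n hn s hs]
    by_cases hhit : b ^ s % n = 1
    · have hsm : m = s := by
        by_contra hne
        exact hmin s hs (by omega) hhit
      rw [if_pos (by exact_mod_cast hhit)]
      rw [hsm, if_pos (by exact_mod_cast hlt)]
    · rw [if_neg (by
        intro hcast
        exact hhit (by exact_mod_cast hcast))]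
      have hx : ((s : Int) + 1) = ((s + 1 : Nat) : Int) := by push_cast; ring
      have hrec := ih (s + 1) e (by omega) (by omega) (by
        intro t ht1 ht2
        rcases Nat.lt_or_ge t s with h | h
        · exact hbelow t ht1 h
        · have hts : t = s := by omega
          exact hts ▸ hhit)
      rw [show (s + 1 - 1 : Nat) = s from by omega] at hrec
      rw [hx, hrec]

-- B's scan over the sorted divisor list also finds m
theorem pvBScan (b n m : Nat) (hn : 2 ≤ n) (hm2 : b ^ m % n = 1)
    (hmin : ∀ t, 0 < t → t < m → b ^ t % n ≠ 1) (phi : Int) :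
    ∀ l : List Int, l.Pairwise (· < ·) → (∀ d ∈ l, 1 ≤ d) → (m : Int) ∈ l →
    pvBOrderScan (b : Int) (n : Int) phi l = (m : Int) := by
  intro l
  induction l with
  | nil => intro _ _ h; simp at h
  | cons d ds ih =>
    intro hpw hpos hmem
    have hcond : (PySem.Int.powMod (b : Int) d.toNat (n : Int) = 1) ↔ (b ^ d.toNat % n = 1) := by
      rw [pvPowModCast b n (by omega) d.toNat]
      constructor
      · intro h; exact_mod_cast h
      · intro h; exact_mod_cast h
    rw [pvBOrderScan]
    by_cases hd : b ^ d.toNat % n = 1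
    · rw [if_pos (hcond.mpr hd)]
      have hd1 : 1 ≤ d := hpos d List.mem_cons_self
      have hmled : m ≤ d.toNat := by
        by_contra h
        exact hmin d.toNat (by omega) (by omega) hd
      rcases List.mem_cons.mp hmem with h | h
      · exact h.symm
      · exfalso
        have hdm : d < (m : Int) := (List.pairwise_cons.mp hpw).1 _ h
        omega
    · rw [if_neg (fun h => hd (hcond.mp h))]
      have hmem' : (m : Int) ∈ ds := by
        rcases List.mem_cons.mp hmem with h | h
        · exfalso
          apply hd
          rw [show d.toNat = m from by omega]
          exact hm2
        · exact h
      exact ih (List.pairwise_cons.mp hpw).2 (fun x hx => hpos x (List.mem_cons_of_mem _ hx)) hmem'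

-- for every coprime candidate the two order computations agree
theorem pvOrder_both (N a : Int) (hN : 3 ≤ N)
    (ha : a ∈ (PySem.List.pyRange 2 N).filter (fun x => Int.gcd x N == 1)) :
    modular_order a N
      = some (pvBOrderScan a N ((Nat.totient N.toNat : Nat) : Int)
          ((PySem.List.pyRange 1 (((Nat.totient N.toNat : Nat) : Int) + 1)).filter
            (fun d => PySem.Int.mod ((Nat.totient N.toNat : Nat) : Int) d == 0))) := by
  obtain ⟨hmem, hpred⟩ := List.mem_filter.mp ha
  obtain ⟨ha2, haN⟩ := PySem.List.mem_pyRange_one.mp hmem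
  have hg : Int.gcd a N = 1 := by simpa using hpred
  set n := N.toNat with hndef
  set b := a.toNat with hbdef
  have hcastN : N = (n : Int) := by omega
  have hcasta : a = (b : Int) := by omega
  have hn3 : 3 ≤ n := by omega
  have hb2 : 2 ≤ b := by omega
  have hbn : b < n := by omega
  have hco : Nat.Coprime b n := by
    have : Int.gcd (b : Int) (n : Int) = 1 := by rw [← hcasta, ← hcastN]; exact hg
    rwa [Int.gcd_natCast_natCast] at this
  have hT : b ^ n.totient % n = 1 := by
    have := Nat.ModEq.pow_totient hco
    unfold Nat.ModEq at this
    rwa [Nat.one_mod_eq_one.mpr (by omega)] at this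
  have hEx : ∃ r, 0 < r ∧ b ^ r % n = 1 :=
    ⟨n.totient, Nat.totient_pos.mpr (by omega), hT⟩
  set m := Nat.find hEx with hmdef
  obtain ⟨hm1, hm2⟩ : 0 < m ∧ b ^ m % n = 1 := Nat.find_spec hEx
  have hmin : ∀ t, 0 < t → t < m → b ^ t % n ≠ 1 := by
    intro t ht1 ht2 hbad
    exact Nat.find_min hEx ht2 ⟨ht1, hbad⟩
  have hmT : m ≤ n.totient := Nat.find_min' hEx ⟨Nat.totient_pos.mpr (by omega), hT⟩
  have htn : n.totient < n := Nat.totient_lt n (by omega)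
  rw [hcasta, hcastN]
  -- A side
  have hA : modular_order (b : Int) (n : Int) = some (m : Int) := by
    have hloop := pvLoopA b n m (by omega) hm2 hmin hm1
      (((n : Int) * (n : Int) + 1 - ((1 : Nat) : Int)).toNat) 1 ((n : Int) * (n : Int) + 1)
      (by omega) rfl (by intro t ht1 ht2; omega)
    rw [show (1 - 1 : Nat) = 0 from rfl, pow_zero, Nat.one_mod_eq_one.mpr (by omega),
      Nat.cast_one] at hloop
    rw [modular_order, if_neg (by
      rw [Int.gcd_natCast_natCast]
      simpa using hco), hloop]
    rw [if_pos (by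
      have h1 : (m : Int) ≤ (n.totient : Int) := by exact_mod_cast hmT
      have h2 : (n.totient : Int) < (n : Int) := by exact_mod_cast htn
      nlinarith)]
  -- B side
  have hB : pvBOrderScan (b : Int) (n : Int) ((n.totient : Nat) : Int)
      ((PySem.List.pyRange 1 (((n.totient : Nat) : Int) + 1)).filter
        (fun d => PySem.Int.mod ((n.totient : Nat) : Int) d == 0)) = (m : Int) := by
    apply pvBScan b n m (by omega) hm2 hmin
    · exact List.Pairwise.sublist List.filter_sublist (PySem.List.pairwise_lt_pyRange_one _ _)
    · intro d hd
      exact (PySem.List.mem_pyRange_one.mp (List.mem_filter.mp hd).1).1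
    · rw [List.mem_filter]
      constructor
      · rw [PySem.List.mem_pyRange_one]
        constructor
        · exact_mod_cast hm1
        · have : (m : Int) ≤ (n.totient : Int) := by exact_mod_cast hmT
          omega
      · rw [beq_iff_eq, PySem.Int.mod_eq_zero_iff_dvd]
        exact_mod_cast pvOrd_dvd b n m n.totient (by omega) hm1 hm2 hmin hT
  rw [hA, hB]

-- the first components of the accumulated info list come from the scanned list
theorem pvFoldFst (scan : Int → Int) (minp : Int) : ∀ (l : List Int) (acc : List (Int × Int)),
    ((l.foldl (fun info a => if minp ≤ scan a then info ++ [(a, scan a)] else info) acc).map Prod.fst).Sublist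
      (acc.map Prod.fst ++ l) := by
  intro l
  induction l with
  | nil => intro acc; simp
  | cons a tl ih =>
    intro acc
    rw [List.foldl_cons]
    by_cases h : minp ≤ scan a
    · rw [if_pos h]
      have := ih (acc ++ [(a, scan a)])
      rw [List.map_append] at this
      simpa [← List.append_cons] using this
    · rw [if_neg h]
      exact (ih acc).trans (List.Sublist.append_left (List.sublist_cons_self _ _) _)
-- sorted([]) is []
theorem pvSorted2_nil (k1 k2 : (Int × Int) → Int) :
    PySem.List.sorted2 ([] : List (Int × Int)) k1 k2 = [] :=
  (PySem.List.sorted2_perm [] k1 k2 false).eq_nil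

-- ===== VERDICT (by name: the statement is the Claim_ definition above) =====
theorem select_representative_a_values_spec : Claim_equal_select_representative_a_values := by
  intro N maxc minp _
  unfold Spec_select_representative_a_values
  simp only [select_representative_a_values, select_representative_a_values_alt]
  by_cases hC : (PySem.List.pyRange 2 N).filter (fun a => Int.gcd a N == 1) = []
  · rw [hC]
    simp only [List.foldl_nil, pvSorted2_nil, pvAPhase1, pvAPhase2,
      List.length_nil, List.map_nil]
    split <;> rfl
  · rw [if_neg hC]
    obtain ⟨a0, ha0⟩ := List.exists_mem_of_ne_nil _ hC
    obtain ⟨ha02, ha0N⟩ := PySem.List.mem_pyRange_one.mp (List.mem_filter.mp ha0).1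
    have hN3 : 3 ≤ N := by omega
    rw [pvPhi_eq N hN3]
    set phi := ((Nat.totient N.toNat : Nat) : Int) with hphidef
    set divisors := (PySem.List.pyRange 1 (phi + 1)).filter (fun d => PySem.Int.mod phi d == 0) with hdivdef
    set coprimes := (PySem.List.pyRange 2 N).filter (fun a => Int.gcd a N == 1) with hcopdef
    have hinfo : coprimes.foldl (fun info a => match modular_order a N with
          | none => info
          | some r => if r < minp then info else info ++ [(a, r)]) []
        = coprimes.foldl (fun info a =>
            if minp ≤ pvBOrderScan a N phi divisors then info ++ [(a, pvBOrderScan a N phi divisors)] else info) [] := by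
      apply PySem.List.foldl_congr_mem
      intro acc x hx
      rw [pvOrder_both N x hN3 hx]
      by_cases h : pvBOrderScan x N phi divisors < minp
      · simp only []
        rw [if_pos h, if_neg (by omega)]
      · simp only []
        rw [if_neg h, if_pos (by omega)]
    rw [hinfo]
    set info := coprimes.foldl (fun info a =>
        if minp ≤ pvBOrderScan a N phi divisors then info ++ [(a, pvBOrderScan a N phi divisors)] else info) []
      with hinfodef
    have hndcop : coprimes.Nodup := (PySem.List.nodup_pyRange_one _ _).filter _
    have hsub : (info.map Prod.fst).Sublist coprimes := by
      have := pvFoldFst (fun x => pvBOrderScan x N phi divisors) minp coprimes []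
      simpa using this
    have hndinfo : (info.map Prod.fst).Nodup := hsub.nodup hndcop
    have hndS : ((PySem.List.sorted2 info (fun x => -x.2) (fun x => x.1)).map Prod.fst).Nodup := by
      have hperm := (PySem.List.sorted2_perm info (fun x => -x.2) (fun x => x.1) false).map Prod.fst
      exact (List.Perm.nodup_iff hperm).mpr hndinfo
    have hsel := pvSelect_eq (PySem.List.sorted2 info (fun x => -x.2) (fun x => x.1)) maxc hndS
    rw [pvBSplit_eq]
    simp only [List.nil_append]
    exact hsel
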